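-- pv_equiv track=rewrite | github.com/sunmingtao/sample-code | python/projecteuler/p106.py | contains_small_set_large_sum
-- ===== SOURCE A (Python) =====
-- def contains_small_set_large_sum(candidate_set):
--     candidate_set = list(candidate_set)
--     candidate_set.sort()
--     for i in range(1, (len(candidate_set) - 1) // 2 + 1):
--         small_sum = sum(candidate_set[0 : i+1])
--         large_sum = sum(candidate_set[-i:])
--         if small_sum <= large_sum:
--             return True
--     return False
-- ===== SOURCE B (Python) =====
-- def contains_small_set_large_sum(candidate_set):
--     s = sorted(candidate_set)
--     n = len(s)
--     small = s[0] if s else 0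
--     large = 0
--     for i in range(1, (n - 1) // 2 + 1):
--         small += s[i]
--         large += s[n - i]
--         if small <= large:
--             return True
--     return False
-- ===== Notes on version B (the rewrite author's own statement) =====
-- stated objective: faster
-- what changed: Instead of re-summing two slices of the sorted list on every iteration, B maintains the running prefix sum (smallest i+1 elements) and suffix sum (largest i elements) incrementally, one O(1) update per iteration.
import Mathlib
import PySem

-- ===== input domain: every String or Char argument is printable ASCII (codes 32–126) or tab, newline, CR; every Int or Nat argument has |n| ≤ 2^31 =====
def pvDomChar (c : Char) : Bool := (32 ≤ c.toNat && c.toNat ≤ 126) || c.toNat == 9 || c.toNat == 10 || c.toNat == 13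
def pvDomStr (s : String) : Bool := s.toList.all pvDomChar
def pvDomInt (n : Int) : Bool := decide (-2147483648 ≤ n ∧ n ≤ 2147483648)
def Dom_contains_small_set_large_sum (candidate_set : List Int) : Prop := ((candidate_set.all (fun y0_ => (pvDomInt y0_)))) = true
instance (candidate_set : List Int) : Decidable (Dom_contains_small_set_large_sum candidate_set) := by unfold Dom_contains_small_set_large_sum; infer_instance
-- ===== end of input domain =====

-- B replaces the per-iteration slice re-summations of A with incrementally maintained
-- prefix/suffix running sums over the same sorted list (one O(1) update per iteration).

-- ===== PORT A =====
def contains_small_set_large_sum (candidate_set : List Int) : Bool :=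
  let s := PySem.List.sorted candidate_set (fun x => x) false
  (PySem.List.pyRange 1 (PySem.Int.floordiv ((s.length : Int) - 1) 2 + 1) 1).any
    (fun i =>
      let small_sum := (PySem.List.slice s (some 0) (some (i + 1))).sum
      let large_sum := (PySem.List.slice s (some (-i)) none).sum
      decide (small_sum ≤ large_sum))

-- ===== PORT B =====
def altGo (s : List Int) (n : Int) : List Int → Int → Int → Bool
  | [], _, _ => false
  | i :: rest, small, large =>
    let small' := small + PySem.List.pyGetD s i 0
    let large' := large + PySem.List.pyGetD s (n - i) 0
    if small' ≤ large' then true else altGo s n rest small' large'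

def contains_small_set_large_sum_alt (candidate_set : List Int) : Bool :=
  let s := PySem.List.sorted candidate_set (fun x => x) false
  let n : Int := s.length
  let small0 : Int := match s with | [] => 0 | x :: _ => x
  altGo s n (PySem.List.pyRange 1 (PySem.Int.floordiv (n - 1) 2 + 1) 1) small0 0

-- ===== PRECONDITION & SPEC =====
def Spec_contains_small_set_large_sum (candidate_set : List Int) (out : Bool) : Prop := out = contains_small_set_large_sum_alt candidate_set
instance (candidate_set : List Int) (out : Bool) : Decidable (Spec_contains_small_set_large_sum candidate_set out) := by unfold Spec_contains_small_set_large_sum; infer_instance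

-- ===== CLAIM (what is proved, stated in full; the proofs are below) =====
def Claim_equal_contains_small_set_large_sum : Prop := ∀ (candidate_set : List Int), Dom_contains_small_set_large_sum candidate_set → Spec_contains_small_set_large_sum candidate_set (contains_small_set_large_sum candidate_set)

-- ===== LEMMAS AND PROOFS =====

lemma altGo_eq (s : List Int) (b : Int) (hb : 2 * b ≤ (s.length : Int) + 1) :
    ∀ (k : Nat) (a : Int), 1 ≤ a → (b - a).toNat = k →
    altGo s (s.length : Int) (PySem.List.pyRange a b 1)
      ((s.take a.toNat).sum) ((s.drop (s.length - (a - 1).toNat)).sum)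
    = (PySem.List.pyRange a b 1).any (fun i =>
        decide ((PySem.List.slice s (some 0) (some (i + 1))).sum
          ≤ (PySem.List.slice s (some (-i)) none).sum)) := by
  intro k
  induction k with
  | zero =>
    intro a ha hk
    have hba : b ≤ a := by omega
    rw [PySem.List.pyRange_one_eq_nil hba]
    simp [altGo]
  | succ k ih =>
    intro a ha hk
    have hab : a < b := by omega
    have ha0 : 0 ≤ a := by omega
    lift a to ℕ using ha0 with m
    have hm1 : 1 ≤ m := by omega
    have hmlt : m < s.length := by omega
    have hnm : s.length - m < s.length := by omega
    rw [PySem.List.pyRange_one_cons hab]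
    simp only [altGo, List.any_cons]
    have hg1 : PySem.List.pyGetD s (↑m) 0 = s[m] := by
      simp [PySem.List.pyGetD_natCast, List.getD_eq_getElem?_getD, hmlt]
    have hcast : (↑s.length : Int) - ↑m = ↑(s.length - m) := by omega
    have hg2 : PySem.List.pyGetD s ((↑s.length : Int) - ↑m) 0 = s[s.length - m] := by
      rw [hcast]
      simp [PySem.List.pyGetD_natCast, List.getD_eq_getElem?_getD, hnm]
    have htoN : ((↑m : Int) - 1).toNat = m - 1 := by omega
    rw [hg1, hg2, htoN, Int.toNat_natCast]
    -- running small sum becomes the prefix sum of the first m+1 elements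
    have hsm : (s.take m).sum + s[m] = (s.take (m + 1)).sum :=
      (List.sum_take_succ s m hmlt).symm
    -- running large sum becomes the suffix sum of the last m elements
    have hdropeq : s.length - (m - 1) = (s.length - m) + 1 := by omega
    have hlg : (s.drop (s.length - (m - 1))).sum + s[s.length - m]
        = (s.drop (s.length - m)).sum := by
      rw [hdropeq, List.drop_eq_getElem_cons hnm, List.sum_cons]
      ring
    rw [hsm, hlg]
    -- A's slice sums at index m
    have hsliceS : PySem.List.slice s (some 0) (some ((↑m : Int) + 1)) = s.take (m + 1) := by
      have : ((↑m : Int) + 1) = ((m + 1 : ℕ) : Int) := by push_cast; ring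
      rw [PySem.List.slice_zero_start, this, PySem.List.slice_to_natCast]
    have hsliceL : PySem.List.slice s (some (-(↑m : Int))) none = s.drop (s.length - m) :=
      PySem.List.slice_from_neg_natCast s m hm1
    rw [hsliceS, hsliceL]
    by_cases hc : (s.take (m + 1)).sum ≤ (s.drop (s.length - m)).sum
    · simp [hc]
    · simp only [hc, if_false]
      have h2 := ih ((↑m : Int) + 1) (by omega) (by omega)
      have e1 : ((↑m : Int) + 1).toNat = m + 1 := by omega
      have e2 : ((↑m : Int) + 1 - 1).toNat = m := by omega
      rw [e1, e2] at h2
      exact h2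

lemma both_eq (s : List Int) :
    (PySem.List.pyRange 1 (PySem.Int.floordiv ((s.length : Int) - 1) 2 + 1) 1).any
      (fun i =>
        decide ((PySem.List.slice s (some 0) (some (i + 1))).sum
          ≤ (PySem.List.slice s (some (-i)) none).sum))
    = altGo s (s.length : Int)
        (PySem.List.pyRange 1 (PySem.Int.floordiv ((s.length : Int) - 1) 2 + 1) 1)
        (match s with | [] => 0 | x :: _ => x) 0 := by
  have hfd : PySem.Int.floordiv ((s.length : Int) - 1) 2 * 2 ≤ (s.length : Int) - 1 :=
    (PySem.Int.le_floordiv_iff_mul_le (by omega)).mp le_rfl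
  cases s with
  | nil => decide
  | cons x t =>
    have key := altGo_eq (x :: t)
      (PySem.Int.floordiv (((x :: t).length : Int) - 1) 2 + 1)
      (by omega)
      ((PySem.Int.floordiv (((x :: t).length : Int) - 1) 2 + 1 - 1).toNat) 1 le_rfl rfl
    have e1 : ((1 : Int)).toNat = 1 := rfl
    have e2 : ((1 : Int) - 1).toNat = 0 := rfl
    rw [e1, e2] at key
    simp only [List.take_succ_cons, List.take_zero, List.sum_cons, List.sum_nil,
      Nat.sub_zero, List.drop_length, add_zero] at key
    exact key.symm

-- ===== VERDICT (by name: the statement is the Claim_ definition above) =====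
theorem contains_small_set_large_sum_spec : Claim_equal_contains_small_set_large_sum := by
  intro cs _
  exact both_eq (PySem.List.sorted cs (fun x => x) false)
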